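-- pv_equiv track=rewrite | github.com/JohannesIBK/plyoox-bot | src/plugins/Infos.py | _get_emojis
-- ===== SOURCE A (Python) =====
-- def _get_emojis(emojis):
--     emojis = [f'{emoji}' for emoji in emojis]
--     string = ''
--
--     for emoji in emojis:
--         if len(string + str(emoji)) > 1015:
--             string += '...'
--             break
--         string += emoji
--
--     if string == '':
--         return '-----'
--     else:
--         return string
-- ===== SOURCE B (Python) =====
-- def _get_emojis(emojis):
--     strs = [f'{emoji}' for emoji in emojis]
--     # find the first index whose inclusive prefix-sum of lengths exceeds 1015
--     total = 0
--     cut = None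
--     for i, s in enumerate(strs):
--         total += len(s)
--         if total > 1015:
--             cut = i
--             break
--     if cut is None:
--         result = ''.join(strs)
--     else:
--         result = ''.join(strs[:cut]) + '...'
--     return result if result else '-----'
-- ===== Notes on version B (the rewrite author's own statement) =====
-- stated objective: alternative
-- what changed: Replaces the incremental build-and-break string accumulation with a prefix-sum pass that finds the cutoff index, followed by one join of the slice (plus '...'); the empty result still maps to '-----'.
import Mathlib
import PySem

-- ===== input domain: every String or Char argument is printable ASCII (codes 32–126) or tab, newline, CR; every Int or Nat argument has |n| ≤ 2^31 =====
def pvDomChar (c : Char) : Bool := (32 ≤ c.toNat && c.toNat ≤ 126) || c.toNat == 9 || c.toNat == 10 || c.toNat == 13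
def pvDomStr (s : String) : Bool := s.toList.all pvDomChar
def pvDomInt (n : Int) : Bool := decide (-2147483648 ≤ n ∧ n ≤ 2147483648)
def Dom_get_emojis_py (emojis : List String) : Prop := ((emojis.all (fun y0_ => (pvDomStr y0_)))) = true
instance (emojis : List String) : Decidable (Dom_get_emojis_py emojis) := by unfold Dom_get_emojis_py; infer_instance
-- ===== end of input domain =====

-- B replaces A's incremental build-and-break accumulation by a prefix-sum cutoff index plus one
-- join of the slice (alternative decomposition, same cost class).

-- ===== PORT A =====
-- A's for-loop with break: structural recursion over the emoji list, carrying the built string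
-- (as List Char; f'{emoji}'/str(emoji) are the identity on str).
def getEmojisLoopA : List String → List Char → List Char
  | [], s => s
  | e :: rest, s =>
    if PySem.Chars.len (s ++ e.toList) > 1015 then s ++ "...".toList
    else getEmojisLoopA rest (s ++ e.toList)

def get_emojis_py (emojis : List String) : String :=
  let s := getEmojisLoopA emojis []
  if s = [] then "-----" else String.ofList s

-- ===== PORT B =====
-- B's prefix-sum scan: first index whose inclusive prefix sum of lengths exceeds 1015.
def getEmojisCut : List String → Int → Nat → Option Nat
  | [], _, _ => none
  | e :: rest, total, i =>
    let total' := total + PySem.Str.len e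
    if total' > 1015 then some i else getEmojisCut rest total' (i + 1)

def get_emojis_py_alt (emojis : List String) : String :=
  let result : List Char :=
    match getEmojisCut emojis 0 0 with
    | none => (emojis.map String.toList).flatten           -- ''.join(strs)
    | some i => ((emojis.take i).map String.toList).flatten ++ "...".toList
  if result = [] then "-----" else String.ofList result

-- ===== PRECONDITION & SPEC =====
def Spec_get_emojis_py (emojis : List String) (out : String) : Prop := out = get_emojis_py_alt emojis
instance (emojis : List String) (out : String) : Decidable (Spec_get_emojis_py emojis out) := by unfold Spec_get_emojis_py; infer_instance

-- ===== CLAIM (what is proved, stated in full; the proofs are below) =====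
def Claim_equal_get_emojis_py : Prop := ∀ (emojis : List String), Dom_get_emojis_py emojis → Spec_get_emojis_py emojis (get_emojis_py emojis)

-- ===== LEMMAS AND PROOFS =====

lemma getEmojisCut_shift (l : List String) (t : Int) (i : Nat) :
    getEmojisCut l t (i + 1) = (getEmojisCut l t i).map (· + 1) := by
  induction l generalizing t i with
  | nil => simp [getEmojisCut]
  | cons e rest ih =>
    simp only [getEmojisCut]
    split_ifs with h
    · simp
    · exact ih _ _

lemma getEmojisLoopA_eq (emojis : List String) (acc : List Char) (t : Int)
    (ht : t = acc.length) :
    getEmojisLoopA emojis acc =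
      match getEmojisCut emojis t 0 with
      | none => acc ++ (emojis.map String.toList).flatten
      | some i => acc ++ ((emojis.take i).map String.toList).flatten ++ "...".toList := by
  induction emojis generalizing acc t with
  | nil => simp [getEmojisLoopA, getEmojisCut]
  | cons e rest ih =>
    simp only [getEmojisLoopA, getEmojisCut]
    have hlen : PySem.Chars.len (acc ++ e.toList) = t + PySem.Str.len e := by
      simp [PySem.Chars.len_eq, PySem.Str.len, ht]
    rw [hlen]
    split_ifs with h
    · simp
    · rw [ih (acc ++ e.toList) (t + PySem.Str.len e)
        (by simp [PySem.Str.len, ht])]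
      rw [getEmojisCut_shift]
      cases hc : getEmojisCut rest (t + PySem.Str.len e) 0 with
      | none => simp
      | some j => simp

-- ===== VERDICT (by name: the statement is the Claim_ definition above) =====
theorem get_emojis_py_spec : Claim_equal_get_emojis_py := by
  intro emojis _
  unfold Spec_get_emojis_py get_emojis_py get_emojis_py_alt
  rw [getEmojisLoopA_eq emojis [] 0 (by simp)]
  cases hc : getEmojisCut emojis 0 0 with
  | none => simp
  | some i => simp
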